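-- pv_equiv track=rewrite | github.com/jslackd/IPRAnalysis | PythonApplication1/read_ipr_fpage.py | decide_trial_type
-- ===== SOURCE A (Python) =====
-- def decide_trial_type(trials):
--     # No data to go off of; return None for type type
--     if len(trials) == 0:
--         return None, False
--
--     error_flag = True
--     ttype = None
--     for trial in trials:
--         if trial.find("IPR") != -1:
--             if ttype == None: ttype = "IPR"
--             elif ttype == "IPR": pass
--             else: ttype = "Mult."
--         elif trial.find("CBM") != -1:
--             if ttype == None: ttype = "CBM"
--             elif ttype == "CBM": pass
--             else: ttype = "Mult."
--         elif trial.find("PGR") != -1: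
--             if ttype == None: ttype = "PGR"
--             elif ttype == "PGR": pass
--             else: ttype = "Mult."
--         else:
--             error_flag = False
--
--     return ttype, error_flag
-- ===== SOURCE B (Python) =====
-- def decide_trial_type(trials):
--     if len(trials) == 0:
--         return None, False
--     cats = set()
--     all_matched = True
--     for t in trials:
--         c = next((k for k in ("IPR", "CBM", "PGR") if k in t), None)
--         if c is None:
--             all_matched = False
--         else:
--             cats.add(c)
--     if not cats:
--         ttype = None
--     elif len(cats) == 1:
--         ttype = cats.pop()
--     else:
--         ttype = "Mult."
--     return ttype, all_matched
-- ===== Notes on version B (the rewrite author's own statement) =====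
-- stated objective: simpler
-- what changed: Replaces A's incremental scalar state machine (None/category/'Mult.' transitions inside the loop) by collecting the matched categories into a set plus an any-unmatched flag, deriving the final type from the set size after the loop.
import Mathlib
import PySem

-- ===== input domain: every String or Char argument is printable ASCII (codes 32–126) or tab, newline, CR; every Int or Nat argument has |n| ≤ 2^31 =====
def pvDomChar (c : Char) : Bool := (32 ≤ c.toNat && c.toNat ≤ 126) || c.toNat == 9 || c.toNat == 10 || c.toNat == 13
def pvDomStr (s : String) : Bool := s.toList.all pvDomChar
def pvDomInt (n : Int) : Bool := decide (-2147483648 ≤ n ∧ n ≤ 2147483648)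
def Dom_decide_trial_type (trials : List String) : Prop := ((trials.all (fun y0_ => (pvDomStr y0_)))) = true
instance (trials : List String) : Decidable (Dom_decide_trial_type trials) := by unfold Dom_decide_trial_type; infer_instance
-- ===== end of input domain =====

-- B replaces A's scalar ttype state machine by a set of seen categories plus an
-- any-unmatched flag, deciding the final type from the set size after the loop (simpler).

-- ===== PORT A =====
-- A's loop body, a fold over the state (ttype, error_flag); branches in A's order.
def pvStepA (st : Option String × Bool) (trial : String) : Option String × Bool :=
  if PySem.Str.find trial "IPR" ≠ -1 then
    if st.1 = none then (some "IPR", st.2)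
    else if st.1 = some "IPR" then st
    else (some "Mult.", st.2)
  else if PySem.Str.find trial "CBM" ≠ -1 then
    if st.1 = none then (some "CBM", st.2)
    else if st.1 = some "CBM" then st
    else (some "Mult.", st.2)
  else if PySem.Str.find trial "PGR" ≠ -1 then
    if st.1 = none then (some "PGR", st.2)
    else if st.1 = some "PGR" then st
    else (some "Mult.", st.2)
  else (st.1, false)

def decide_trial_type (trials : List String) : Option String × Bool :=
  if trials.length = 0 then (none, false)
  else trials.foldl pvStepA (none, true)

-- ===== PORT B =====
-- Source B: category of one trial — first of "IPR","CBM","PGR" contained in it, else none.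
def pvCat (t : String) : Option String :=
  if PySem.Str.isIn "IPR" t then some "IPR"
  else if PySem.Str.isIn "CBM" t then some "CBM"
  else if PySem.Str.isIn "PGR" t then some "PGR"
  else none

-- Source B loop body: state = (set of seen categories, all_matched flag).
def pvStepB (st : PySem.Set String × Bool) (t : String) : PySem.Set String × Bool :=
  match pvCat t with
  | none => (st.1, false)
  | some c => (PySem.Set.add st.1 c, st.2)

-- Source B post-loop decision: empty set → None, singleton → its element (cats.pop()), else "Mult.".
def pvFromSet (cats : PySem.Set String) : Option String :=
  match cats with
  | [] => none
  | [c] => some c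
  | _ => some "Mult."

def decide_trial_type_alt (trials : List String) : Option String × Bool :=
  if trials.isEmpty then (none, false)
  else
    let st := trials.foldl pvStepB (PySem.Set.empty, true)
    (pvFromSet st.1, st.2)

-- ===== PRECONDITION & SPEC =====
def Spec_decide_trial_type (trials : List String) (out : Option String × Bool) : Prop := out = decide_trial_type_alt trials
instance (trials : List String) (out : Option String × Bool) : Decidable (Spec_decide_trial_type trials out) := by unfold Spec_decide_trial_type; infer_instance

-- ===== CLAIM (what is proved, stated in full; the proofs are below) =====
def Claim_equal_decide_trial_type : Prop := ∀ (trials : List String), Dom_decide_trial_type trials → Spec_decide_trial_type trials (decide_trial_type trials)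

-- ===== LEMMAS AND PROOFS =====

-- A's branch test trial.find(sub) != -1 equals B's test sub in trial.
lemma find_ne_iff_isIn (trial sub : String) :
    (PySem.Str.find trial sub ≠ -1) ↔ PySem.Str.isIn sub trial = true := by
  rw [PySem.Str.find_ne_neg_one_iff, PySem.Str.isIn_iff_infix]

-- One step: A's update of ttype matches B's update of the category set through pvFromSet,
-- the flags stay equal, and "Mult." never enters the set.
-- Adding one category c to the set updates pvFromSet exactly as A updates ttype.
lemma interp_add (c : String) (cats : List String) (hm : "Mult." ∉ cats) (hc : c ≠ "Mult.") :
    (pvFromSet (PySem.Set.add cats c) =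
      if pvFromSet cats = none then some c
      else if pvFromSet cats = some c then pvFromSet cats
      else some "Mult.") ∧ "Mult." ∉ PySem.Set.add cats c := by
  match cats with
  | [] =>
      constructor
      · simp [pvFromSet, PySem.Set.add]
      · simp [PySem.Set.add, Ne.symm hc]
  | [a] =>
      by_cases hca : c = a
      · subst hca
        constructor
        · simp [pvFromSet, PySem.Set.add]
        · simpa [PySem.Set.add] using hm
      · constructor
        · simp [pvFromSet, PySem.Set.add, hca, Ne.symm hca]
        · simp [PySem.Set.add, hca, Ne.symm hc]
          intro h; exact hm (by simp [h])
  | a :: b :: r =>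
      have hadd : pvFromSet (PySem.Set.add (a :: b :: r) c) = some "Mult." := by
        unfold PySem.Set.add
        split
        · rfl
        · rfl
      constructor
      · rw [hadd]
        simp [pvFromSet]
      · unfold PySem.Set.add
        split
        · exact hm
        · simp only [List.mem_append, List.mem_singleton]
          rintro (h | h)
          · exact hm h
          · exact hc h.symm

lemma step_sim (t : String) (cats : List String) (flag : Bool)
    (hm : "Mult." ∉ cats) :
    pvStepA (pvFromSet cats, flag) t =
      ((pvFromSet (pvStepB (cats, flag) t).1), (pvStepB (cats, flag) t).2) ∧
    "Mult." ∉ (pvStepB (cats, flag) t).1 := by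
  have hI := interp_add "IPR" cats hm (by decide)
  have hC := interp_add "CBM" cats hm (by decide)
  have hP := interp_add "PGR" cats hm (by decide)
  unfold pvStepA pvStepB pvCat
  by_cases h1 : PySem.Str.isIn "IPR" t = true
  · simp only [find_ne_iff_isIn, h1, if_true]
    refine ⟨?_, hI.2⟩; rw [hI.1]; split_ifs <;> rfl
  · by_cases h2 : PySem.Str.isIn "CBM" t = true
    · simp only [find_ne_iff_isIn, Bool.false_eq_true, h1, h2, if_true, if_false]
      refine ⟨?_, hC.2⟩; rw [hC.1]; split_ifs <;> rfl
    · by_cases h3 : PySem.Str.isIn "PGR" t = true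
      · simp only [find_ne_iff_isIn, Bool.false_eq_true, h1, h2, h3, if_true, if_false]
        refine ⟨?_, hP.2⟩; rw [hP.1]; split_ifs <;> rfl
      · simp only [find_ne_iff_isIn, Bool.false_eq_true, h1, h2, h3, if_false]
        exact ⟨trivial, hm⟩

-- Loop simulation: running A's fold from the interpretation of B's state equals
-- interpreting B's fold result.
lemma loop_sim (trials : List String) :
    ∀ (cats : List String) (flag : Bool), "Mult." ∉ cats →
    trials.foldl pvStepA (pvFromSet cats, flag) =
      ((pvFromSet (trials.foldl pvStepB (cats, flag)).1),
       (trials.foldl pvStepB (cats, flag)).2) := by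
  induction trials with
  | nil => intro cats flag _; rfl
  | cons t ts ih =>
    intro cats flag hm
    obtain ⟨hstep, hmem⟩ := step_sim t cats flag hm
    cases h : pvStepB (cats, flag) t with
    | mk cats' flag' =>
      rw [h] at hstep hmem
      simp only [List.foldl_cons, hstep, h]
      exact ih cats' flag' hmem

-- ===== VERDICT (by name: the statement is the Claim_ definition above) =====
theorem decide_trial_type_spec : Claim_equal_decide_trial_type := by
  intro trials _
  unfold Spec_decide_trial_type decide_trial_type decide_trial_type_alt
  cases trials with
  | nil => rfl
  | cons t ts =>
    simp only [List.length_cons, List.isEmpty_cons, if_neg (by omega : ¬ (ts.length + 1 = 0)),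
      Bool.false_eq_true, if_false]
    exact loop_sim (t :: ts) [] true (by simp)
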